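-- pv_equiv track=rewrite | github.com/bekerk/yapflame | examples/multiple_tasks.py | string_processing
-- ===== SOURCE A (Python) =====
-- def string_processing(iterations: int = 50_000) -> str:
--     s = ""
--     for i in range(iterations):
--         s += f"item-{i}-"
--     parts = s.split("-")
--     result = ",".join(parts)
--     _ = result.upper()
--     _ = result.lower()
--     return result[:100]
-- ===== SOURCE B (Python) =====
-- def string_processing(iterations: int = 50_000) -> str:
--     # The dash string split on "-" and rejoined with "," is exactly the same
--     # text with every "-" turned into ","; so build that comma string directly
--     # as one join of per-iteration chunks "item,<i>," (no split, no field list).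
--     result = "".join(f"item,{i}," for i in range(iterations))
--     return result[:100]
-- ===== Notes on version B (the rewrite author's own statement) =====
-- stated objective: faster
-- what changed: B builds the final comma-separated text directly as one join of per-iteration chunks 'item,<i>,' (split('-') then ','.join is just '-'->',' on the dash string), dropping the quadratic repeated string concatenation, the split pass and the dead upper()/lower() calls.
import Mathlib
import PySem

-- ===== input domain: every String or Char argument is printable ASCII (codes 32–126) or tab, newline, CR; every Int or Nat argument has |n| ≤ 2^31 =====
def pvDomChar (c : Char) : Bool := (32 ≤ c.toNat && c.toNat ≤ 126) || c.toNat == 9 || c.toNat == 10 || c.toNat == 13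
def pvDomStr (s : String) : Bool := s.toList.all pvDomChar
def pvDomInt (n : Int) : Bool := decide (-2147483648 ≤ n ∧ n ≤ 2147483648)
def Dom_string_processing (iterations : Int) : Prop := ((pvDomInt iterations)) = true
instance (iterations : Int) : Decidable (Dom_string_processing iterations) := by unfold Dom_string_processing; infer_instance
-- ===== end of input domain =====

-- B builds the comma-separated text directly as one join of per-iteration chunks
-- "item,<i>," (split('-') then ','.join is '-'→',' on the dash string), instead of
-- repeated concatenation of a dash string followed by a split pass.

-- ===== PORT A =====
def string_processing (iterations : Int) : String :=
  let s : List Char := (PySem.List.pyRange 0 iterations 1).foldl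
    (fun s i => s ++ ("item-".toList ++ PySem.Int.toChars i ++ "-".toList)) []
  let parts : List (List Char) := PySem.Chars.splitOn s "-".toList
  let result : List Char := PySem.Chars.join ",".toList parts
  let _ := PySem.Chars.upper result
  let _ := PySem.Chars.lower result
  String.ofList (PySem.Chars.slice result none (some 100))

-- ===== PORT B =====
def string_processing_alt (iterations : Int) : String :=
  let result : List Char :=
    (PySem.List.pyRange 0 iterations 1).flatMap
      (fun i => "item,".toList ++ PySem.Int.toChars i ++ ",".toList)
  String.ofList (PySem.Chars.slice result none (some 100))

-- ===== PRECONDITION & SPEC =====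
def Spec_string_processing (iterations : Int) (out : String) : Prop := out = string_processing_alt iterations
instance (iterations : Int) (out : String) : Decidable (Spec_string_processing iterations out) := by unfold Spec_string_processing; infer_instance

-- ===== CLAIM (what is proved, stated in full; the proofs are below) =====
def Claim_equal_string_processing : Prop := ∀ (iterations : Int), Dom_string_processing iterations → Spec_string_processing iterations (string_processing iterations)

-- ===== LEMMAS AND PROOFS =====

-- PySem.Chars.splitOn.go on the single-char separator ['-'] computes List.splitOnP.
theorem pv_go_spec (fuel : Nat) (l cur : List Char) (acc : List (List Char)) (h : l.length < fuel) :
    PySem.Chars.splitOn.go ['-'] fuel l cur acc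
      = acc.reverse ++ List.modifyHead (cur.reverse ++ ·) (List.splitOnP (· == '-') l) := by
  induction fuel generalizing l cur acc with
  | zero => omega
  | succ f ih =>
    cases l with
    | nil =>
      simp [PySem.Chars.splitOn.go, List.splitOnP_nil]
    | cons c rest =>
      rw [PySem.Chars.splitOn.go.eq_def]
      by_cases hc : c = '-'
      · subst hc
        simp only [List.isPrefixOf, beq_self_eq_true, Bool.true_and, if_pos]
        rw [List.length_cons] at h
        simp only [List.length_cons, List.drop_succ_cons, List.drop_zero, List.length_nil]
        rw [ih _ _ _ (by omega)]
        rcases hsp : List.splitOnP (· == '-') rest with _ | ⟨hd, tl⟩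
        · exact absurd hsp (List.splitOnP_ne_nil _ _)
        · simp [List.splitOnP_cons, hsp]
      · have hpre : List.isPrefixOf ['-'] (c :: rest) = false := by
          simp [List.isPrefixOf]
          exact fun h' => absurd h'.symm hc
        simp only [hpre, Bool.false_eq_true, if_neg, not_false_iff]
        rw [List.length_cons] at h
        rw [ih _ _ _ (by omega)]
        rcases hsp : List.splitOnP (· == '-') rest with _ | ⟨hd, tl⟩
        · exact absurd hsp (List.splitOnP_ne_nil _ _)
        · have : (c == '-') = false := by simp [hc]
          simp [List.splitOnP_cons, hsp, this]

theorem pv_splitOn_dash (s : List Char) :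
    PySem.Chars.splitOn s "-".toList = List.splitOnP (· == '-') s := by
  have : PySem.Chars.splitOn s ['-']
      = [].reverse ++ List.modifyHead (List.nil.reverse ++ ·) (List.splitOnP (· == '-') s) :=
    pv_go_spec (s.length + 1) s [] [] (by omega)
  rcases hsp : List.splitOnP (· == '-') s with _ | ⟨hd, tl⟩
  · exact absurd hsp (List.splitOnP_ne_nil _ _)
  · simpa [hsp] using this

theorem pv_no_dash_toChars (i : Int) (h : 0 ≤ i) : '-' ∉ PySem.Int.toChars i := by
  intro hmem
  unfold PySem.Int.toChars at hmem
  rw [if_neg (by omega)] at hmem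
  have := Nat.isDigit_of_mem_toDigits (b := 10) (by omega) (le_refl _) hmem
  simp [Char.isDigit] at this

-- splitting the flattened chunk list gives the word list plus a trailing empty field
theorem pv_split_flat (l : List Int) (h : ∀ i ∈ l, 0 ≤ i) :
    List.splitOnP (· == '-')
        (l.flatMap (fun i => "item-".toList ++ PySem.Int.toChars i ++ "-".toList))
      = l.flatMap (fun i => ["item".toList, PySem.Int.toChars i]) ++ [[]] := by
  induction l with
  | nil => simp [List.splitOnP_nil]
  | cons a l ih =>
    have ha : 0 ≤ a := h a (List.mem_cons_self ..)
    have hrest := ih (fun i hi => h i (List.mem_cons_of_mem _ hi))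
    have hshape :
        (a :: l).flatMap (fun i => "item-".toList ++ PySem.Int.toChars i ++ "-".toList)
          = ['i','t','e','m'] ++ '-' ::
              (PySem.Int.toChars a ++ '-' ::
                l.flatMap (fun i => "item-".toList ++ PySem.Int.toChars i ++ "-".toList)) := by
      simp
    rw [hshape,
      List.splitOnP_first _ _ (fun x hx => by fin_cases hx <;> simp) '-' (by simp),
      List.splitOnP_first _ _ (fun x hx => by
        simp only [beq_iff_eq]
        intro hxeq; subst hxeq; exact pv_no_dash_toChars a ha hx) '-' (by simp),
      hrest]
    simp

-- joining the word list (with its trailing empty field) with "," flattens to B's chunks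
theorem pv_join_flat (l : List Int) :
    PySem.Chars.join ",".toList
        (l.flatMap (fun i => ["item".toList, PySem.Int.toChars i]) ++ [[]])
      = l.flatMap (fun i => "item,".toList ++ PySem.Int.toChars i ++ ",".toList) := by
  induction l with
  | nil => decide
  | cons a l ih =>
    rcases hsh : l.flatMap (fun i => ["item".toList, PySem.Int.toChars i]) ++ [[]]
        with _ | ⟨hd, tl⟩
    · simp at hsh
    · simp only [List.flatMap_cons, List.cons_append, List.append_assoc,
        List.nil_append] at *
      rw [hsh] at ih ⊢
      rw [PySem.Chars.join_cons_cons, PySem.Chars.join_cons_cons, ih]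
      simp

-- ===== VERDICT (by name: the statement is the Claim_ definition above) =====
theorem string_processing_spec : Claim_equal_string_processing := by
  intro n _
  unfold Spec_string_processing string_processing string_processing_alt
  rw [PySem.List.foldl_append_eq_flatMap]
  simp only [List.nil_append]
  rw [pv_splitOn_dash,
    pv_split_flat _ (fun i hi => (PySem.List.mem_pyRange_one.mp hi).1),
    pv_join_flat]
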